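-- pv_equiv track=rewrite | github.com/miny-genie/BOJ | acmicpc_2210.py | compute_six_digit_numbers
-- ===== SOURCE A (Python) =====
-- def compute_six_digit_numbers(graph: list[list[str]]) -> int:
--     def dfs(x: int, y: int, nums: list, depth: int) -> None:
--         if depth == 6:
--             six_digit_numbers.add(''.join(nums))
--             return
--
--         for dx, dy in [(0, 1), (0, -1), (1, 0), (-1, 0)]:
--             nx = dx + x
--             ny = dy + y
--             if nx < 0 or nx > 4 or ny < 0 or ny > 4:
--                 continue
--
--             nums.append(graph[nx][ny])
--             dfs(nx, ny, nums, depth + 1)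
--             nums.pop()
--
--     six_digit_numbers = set()
--
--     for row in range(5):
--         for col in range(5):
--             cur = [graph[row][col]]
--             dfs(row, col, cur, 1)
--
--     return len(six_digit_numbers)
-- ===== SOURCE B (Python) =====
-- def compute_six_digit_numbers(graph: list[list[str]]) -> int:
--     frontier = {(r, c, graph[r][c]) for r in range(5) for c in range(5)}
--     for _ in range(5):
--         nxt = set()
--         for x, y, s in frontier:
--             for dx, dy in ((0, 1), (0, -1), (1, 0), (-1, 0)):
--                 nx, ny = dx + x, dy + y
--                 if 0 <= nx <= 4 and 0 <= ny <= 4: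
--                     nxt.add((nx, ny, s + graph[nx][ny]))
--         frontier = nxt
--     return len({s for _, _, s in frontier})
-- ===== Notes on version B (the rewrite author's own statement) =====
-- stated objective: alternative
-- what changed: Replaces the 25 recursive depth-6 DFS walks with an iterative breadth-first level expansion: a frontier set of (row, col, accumulated string) states seeded at all 25 cells is expanded 5 times, deduplicating states at every level, and the distinct strings of the final frontier are counted.
import Mathlib
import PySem

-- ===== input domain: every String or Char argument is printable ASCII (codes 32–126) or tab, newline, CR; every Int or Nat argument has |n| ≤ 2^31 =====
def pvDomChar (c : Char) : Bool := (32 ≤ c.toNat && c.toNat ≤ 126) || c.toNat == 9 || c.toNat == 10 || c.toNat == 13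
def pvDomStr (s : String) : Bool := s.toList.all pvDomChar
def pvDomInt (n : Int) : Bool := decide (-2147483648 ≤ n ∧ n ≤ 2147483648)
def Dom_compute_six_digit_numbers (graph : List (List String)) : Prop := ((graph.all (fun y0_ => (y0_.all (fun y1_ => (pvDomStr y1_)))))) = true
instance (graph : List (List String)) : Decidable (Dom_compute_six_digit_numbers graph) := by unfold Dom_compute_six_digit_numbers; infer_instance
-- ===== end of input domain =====

-- B replaces A's 25 recursive depth-6 DFS walks by an iterative breadth-first level expansion of a
-- deduplicated frontier of (row, col, accumulated string) states (alternative decomposition, not claimed faster).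

-- ===== PORT A =====
-- graph[x][y] (indices are in range for every access A performs on inputs satisfying Pre_)
def pvCell (g : List (List String)) (x y : Int) : String :=
  PySem.List.pyGetD (PySem.List.pyGetD g x []) y ""

def pvMovesA : List (Int × Int) := [(0, 1), (0, -1), (1, 0), (-1, 0)]

-- A's dfs; `fuel` is 6 - depth, so the top-level call dfs(row, col, cur, 1) has fuel 5
def pvDfs (g : List (List String)) (x y : Int) (nums : List String) (fuel : Nat)
    (acc : PySem.Set String) : PySem.Set String :=
  match fuel with
  | 0 => PySem.Set.add acc (PySem.Str.join "" nums)
  | f + 1 =>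
    pvMovesA.foldl (fun acc m =>
      if m.1 + x < 0 ∨ m.1 + x > 4 ∨ m.2 + y < 0 ∨ m.2 + y > 4 then acc
      else pvDfs g (m.1 + x) (m.2 + y) (nums ++ [pvCell g (m.1 + x) (m.2 + y)]) f acc) acc

def compute_six_digit_numbers (graph : List (List String)) : Int :=
  PySem.Set.len
    ((PySem.List.pyRange 0 5 1).foldl (fun acc row =>
        (PySem.List.pyRange 0 5 1).foldl (fun acc col =>
          pvDfs graph row col [pvCell graph row col] 5 acc) acc)
      (PySem.Set.empty))

-- ===== PORT B =====
def pvMovesB : List (Int × Int) := [(0, 1), (0, -1), (1, 0), (-1, 0)]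

-- {(r, c, graph[r][c]) for r in range(5) for c in range(5)}
def pvSeed (g : List (List String)) : PySem.Set (Int × Int × String) :=
  PySem.Set.ofList ((PySem.List.pyRange 0 5 1).flatMap (fun r =>
    (PySem.List.pyRange 0 5 1).map (fun c => (r, c, pvCell g r c))))

-- one breadth-first expansion of the frontier
def pvStep (g : List (List String)) (F : PySem.Set (Int × Int × String)) :
    PySem.Set (Int × Int × String) :=
  F.foldl (fun nxt st =>
    pvMovesB.foldl (fun nxt m =>
      if 0 ≤ m.1 + st.1 ∧ m.1 + st.1 ≤ 4 ∧ 0 ≤ m.2 + st.2.1 ∧ m.2 + st.2.1 ≤ 4 then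
        PySem.Set.add nxt (m.1 + st.1, m.2 + st.2.1, st.2.2 ++ pvCell g (m.1 + st.1) (m.2 + st.2.1))
      else nxt) nxt)
    (PySem.Set.empty)

def compute_six_digit_numbers_alt (graph : List (List String)) : Int :=
  PySem.Set.len
    (PySem.Set.ofList
      (((PySem.List.pyRange 0 5 1).foldl (fun F _ => pvStep graph F) (pvSeed graph)).map
        (fun st => st.2.2)))

-- ===== PRECONDITION & SPEC =====
-- Pre_ excludes exactly the grids on which A raises IndexError: A reads graph[r][c] for all 0 ≤ r, c ≤ 4,
-- so the grid needs at least 5 rows whose first 5 each have at least 5 entries.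
def Pre_compute_six_digit_numbers (graph : List (List String)) : Prop :=
  5 ≤ graph.length ∧ ∀ row ∈ graph.take 5, 5 ≤ row.length
instance (graph : List (List String)) : Decidable (Pre_compute_six_digit_numbers graph) := by
  unfold Pre_compute_six_digit_numbers; infer_instance

def pvWitness_compute_six_digit_numbers : List (List String) :=
  List.replicate 5 (List.replicate 5 "1")

def Spec_compute_six_digit_numbers (graph : List (List String)) (out : Int) : Prop := out = compute_six_digit_numbers_alt graph
instance (graph : List (List String)) (out : Int) : Decidable (Spec_compute_six_digit_numbers graph out) := by unfold Spec_compute_six_digit_numbers; infer_instance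

-- ===== CLAIM (what is proved, stated in full; the proofs are below) =====
def Claim_equal_compute_six_digit_numbers : Prop := ∀ (graph : List (List String)), Dom_compute_six_digit_numbers graph → Pre_compute_six_digit_numbers graph → Spec_compute_six_digit_numbers graph (compute_six_digit_numbers graph)

-- ===== LEMMAS AND PROOFS =====

-- ''.join
def pvJ (l : List String) : String := PySem.Str.join "" l

theorem pvJ_append_singleton (l : List String) (s : String) :
    pvJ (l ++ [s]) = pvJ l ++ s := by
  apply String.toList_injective
  simp [pvJ, PySem.Str.toList_join, PySem.Chars.join, List.intercalate]
  induction l with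
  | nil => simp
  | cons a t ih => cases t <;> simp_all

-- all in-bounds walk continuations of a given length from (x, y), with their endpoints
def pvSufs (g : List (List String)) (x y : Int) : Nat → List (Int × Int × List String)
  | 0 => [(x, y, [])]
  | f + 1 =>
    pvMovesA.flatMap (fun m =>
      if m.1 + x < 0 ∨ m.1 + x > 4 ∨ m.2 + y < 0 ∨ m.2 + y > 4 then []
      else (pvSufs g (m.1 + x) (m.2 + y) f).map
        (fun e => (e.1, e.2.1, pvCell g (m.1 + x) (m.2 + y) :: e.2.2)))

theorem mem_pvDfs (g : List (List String)) :
    ∀ (f : Nat) (x y : Int) (nums : List String) (acc : PySem.Set String) (s : String),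
      s ∈ pvDfs g x y nums f acc ↔
        s ∈ acc ∨ ∃ e ∈ pvSufs g x y f, s = pvJ (nums ++ e.2.2) := by
  intro f
  induction f with
  | zero =>
    intro x y nums acc s
    simp [pvDfs, pvSufs, PySem.Set.mem_add, pvJ]
  | succ f ih =>
    intro x y nums acc s
    have H : ∀ (ms : List (Int × Int)) (acc : PySem.Set String),
        s ∈ ms.foldl (fun acc m =>
          if m.1 + x < 0 ∨ m.1 + x > 4 ∨ m.2 + y < 0 ∨ m.2 + y > 4 then acc
          else pvDfs g (m.1 + x) (m.2 + y) (nums ++ [pvCell g (m.1 + x) (m.2 + y)]) f acc) acc ↔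
        s ∈ acc ∨ ∃ m ∈ ms,
          ¬(m.1 + x < 0 ∨ m.1 + x > 4 ∨ m.2 + y < 0 ∨ m.2 + y > 4) ∧
          ∃ e ∈ pvSufs g (m.1 + x) (m.2 + y) f,
            s = pvJ (nums ++ pvCell g (m.1 + x) (m.2 + y) :: e.2.2) := by
      intro ms
      induction ms with
      | nil => simp
      | cons m ms ihm =>
        intro acc
        simp only [List.foldl_cons]
        by_cases hc : m.1 + x < 0 ∨ m.1 + x > 4 ∨ m.2 + y < 0 ∨ m.2 + y > 4
        · simp only [if_pos hc, ihm, List.mem_cons]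
          constructor
          · rintro (h | ⟨m', hm', h1, h2⟩)
            · exact Or.inl h
            · exact Or.inr ⟨m', Or.inr hm', h1, h2⟩
          · rintro (h | ⟨m', (rfl | hm'), h1, h2⟩)
            · exact Or.inl h
            · exact absurd hc h1
            · exact Or.inr ⟨m', hm', h1, h2⟩
        · simp only [if_neg hc, ihm, ih, List.mem_cons]
          constructor
          · rintro ((h | ⟨e, he, hs⟩) | ⟨m', hm', h1, h2⟩)
            · exact Or.inl h
            · exact Or.inr ⟨m, Or.inl rfl, hc, e, he, by simpa using hs⟩
            · exact Or.inr ⟨m', Or.inr hm', h1, h2⟩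
          · rintro (h | ⟨m', (rfl | hm'), h1, h2⟩)
            · exact Or.inl (Or.inl h)
            · obtain ⟨e, he, hs⟩ := h2
              exact Or.inl (Or.inr ⟨e, he, by simpa using hs⟩)
            · exact Or.inr ⟨m', hm', h1, h2⟩
    rw [show pvDfs g x y nums (f + 1) acc = pvMovesA.foldl (fun acc m =>
          if m.1 + x < 0 ∨ m.1 + x > 4 ∨ m.2 + y < 0 ∨ m.2 + y > 4 then acc
          else pvDfs g (m.1 + x) (m.2 + y) (nums ++ [pvCell g (m.1 + x) (m.2 + y)]) f acc) acc
        from rfl, H]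
    simp only [pvSufs, List.mem_flatMap]
    constructor
    · rintro (h | ⟨m, hm, h1, e, he, hs⟩)
      · exact Or.inl h
      · exact Or.inr ⟨(e.1, e.2.1, pvCell g (m.1 + x) (m.2 + y) :: e.2.2),
          ⟨m, hm, by rw [if_neg h1]; exact List.mem_map_of_mem he⟩, hs⟩
    · rintro (h | ⟨e', ⟨m, hm, he'⟩, hs⟩)
      · exact Or.inl h
      · by_cases h1 : m.1 + x < 0 ∨ m.1 + x > 4 ∨ m.2 + y < 0 ∨ m.2 + y > 4
        · rw [if_pos h1] at he'; simp at he'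
        · rw [if_neg h1] at he'
          obtain ⟨e, he, rfl⟩ := List.mem_map.mp he'
          exact Or.inr ⟨m, hm, h1, e, he, hs⟩

theorem mem_pvDfs_grid (g : List (List String)) :
    ∀ (R C : List Int) (acc : PySem.Set String) (s : String),
      s ∈ R.foldl (fun acc row => C.foldl (fun acc col =>
            pvDfs g row col [pvCell g row col] 5 acc) acc) acc ↔
        s ∈ acc ∨ ∃ r ∈ R, ∃ c ∈ C, ∃ e ∈ pvSufs g r c 5,
          s = pvJ (pvCell g r c :: e.2.2) := by
  intro R C
  have HC : ∀ (r : Int) (acc : PySem.Set String) (s : String),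
      s ∈ C.foldl (fun acc col => pvDfs g r col [pvCell g r col] 5 acc) acc ↔
        s ∈ acc ∨ ∃ c ∈ C, ∃ e ∈ pvSufs g r c 5, s = pvJ (pvCell g r c :: e.2.2) := by
    intro r
    induction C with
    | nil => simp
    | cons c cs ihc =>
      intro acc s
      simp only [List.foldl_cons, ihc, mem_pvDfs, List.mem_cons]
      constructor
      · rintro ((h | ⟨e, he, hs⟩) | ⟨c', hc', h2⟩)
        · exact Or.inl h
        · exact Or.inr ⟨c, Or.inl rfl, e, he, by simpa using hs⟩
        · exact Or.inr ⟨c', Or.inr hc', h2⟩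
      · rintro (h | ⟨c', (rfl | hc'), e, he, hs⟩)
        · exact Or.inl (Or.inl h)
        · exact Or.inl (Or.inr ⟨e, he, by simpa using hs⟩)
        · exact Or.inr ⟨c', hc', e, he, hs⟩
  induction R with
  | nil => simp
  | cons r rs ihr =>
    intro acc s
    simp only [List.foldl_cons, ihr, HC, List.mem_cons]
    constructor
    · rintro ((h | h2) | ⟨r', hr', h2⟩)
      · exact Or.inl h
      · exact Or.inr ⟨r, Or.inl rfl, h2⟩
      · exact Or.inr ⟨r', Or.inr hr', h2⟩
    · rintro (h | ⟨r', (rfl | hr'), h2⟩)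
      · exact Or.inl (Or.inl h)
      · exact Or.inl (Or.inr h2)
      · exact Or.inr ⟨r', hr', h2⟩

-- snoc characterisation of walk continuations: one more step extends at the END
theorem mem_pvSufs_succ (g : List (List String)) :
    ∀ (k : Nat) (x y : Int) (e : Int × Int × List String),
      e ∈ pvSufs g x y (k + 1) ↔
        ∃ e' ∈ pvSufs g x y k, ∃ m ∈ pvMovesA,
          ¬(m.1 + e'.1 < 0 ∨ m.1 + e'.1 > 4 ∨ m.2 + e'.2.1 < 0 ∨ m.2 + e'.2.1 > 4) ∧
          e = (m.1 + e'.1, m.2 + e'.2.1,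
               e'.2.2 ++ [pvCell g (m.1 + e'.1) (m.2 + e'.2.1)]) := by
  intro k
  induction k with
  | zero =>
    intro x y e
    simp only [pvSufs, List.mem_flatMap, List.mem_singleton]
    constructor
    · rintro ⟨m, hm, he⟩
      by_cases h1 : m.1 + x < 0 ∨ m.1 + x > 4 ∨ m.2 + y < 0 ∨ m.2 + y > 4
      · rw [if_pos h1] at he; simp at he
      · rw [if_neg h1] at he
        obtain ⟨e', he', rfl⟩ := List.mem_map.mp he
        simp only [List.mem_singleton] at he'
        subst he'
        exact ⟨(x, y, []), rfl, m, hm, h1, rfl⟩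
    · rintro ⟨e', rfl, m, hm, h1, rfl⟩
      dsimp only at h1 ⊢
      exact ⟨m, hm, by rw [if_neg h1]; simp⟩
  | succ k ih =>
    intro x y e
    constructor
    · intro he
      simp only [pvSufs, List.mem_flatMap] at he
      obtain ⟨m, hm, he⟩ := he
      by_cases h1 : m.1 + x < 0 ∨ m.1 + x > 4 ∨ m.2 + y < 0 ∨ m.2 + y > 4
      · rw [if_pos h1] at he; simp at he
      · rw [if_neg h1] at he
        obtain ⟨e1, he1, rfl⟩ := List.mem_map.mp he
        obtain ⟨e2, he2, m', hm', h2, rfl⟩ := (ih (m.1 + x) (m.2 + y) e1).mp he1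
        refine ⟨(e2.1, e2.2.1, pvCell g (m.1 + x) (m.2 + y) :: e2.2.2), ?_, m', hm', h2, rfl⟩
        simp only [pvSufs, List.mem_flatMap]
        exact ⟨m, hm, by rw [if_neg h1]; exact List.mem_map_of_mem he2⟩
    · rintro ⟨e', he', m', hm', h2, rfl⟩
      simp only [pvSufs, List.mem_flatMap] at he'
      obtain ⟨m, hm, he'⟩ := he'
      by_cases h1 : m.1 + x < 0 ∨ m.1 + x > 4 ∨ m.2 + y < 0 ∨ m.2 + y > 4
      · rw [if_pos h1] at he'; simp at he'
      · rw [if_neg h1] at he'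
        obtain ⟨e2, he2, rfl⟩ := List.mem_map.mp he'
        simp only [pvSufs, List.mem_flatMap]
        refine ⟨m, hm, ?_⟩
        rw [if_neg h1]
        refine List.mem_map.mpr ⟨(m'.1 + e2.1, m'.2 + e2.2.1,
          e2.2.2 ++ [pvCell g (m'.1 + e2.1) (m'.2 + e2.2.1)]), ?_, by simp⟩
        exact (ih (m.1 + x) (m.2 + y) _).mpr ⟨e2, he2, m', hm', by simpa using h2, rfl⟩

-- membership after one frontier expansion
theorem mem_pvStep (g : List (List String)) (F : PySem.Set (Int × Int × String))
    (t : Int × Int × String) :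
    t ∈ pvStep g F ↔
      ∃ st ∈ F, ∃ m ∈ pvMovesB,
        (0 ≤ m.1 + st.1 ∧ m.1 + st.1 ≤ 4 ∧ 0 ≤ m.2 + st.2.1 ∧ m.2 + st.2.1 ≤ 4) ∧
        t = (m.1 + st.1, m.2 + st.2.1,
             st.2.2 ++ pvCell g (m.1 + st.1) (m.2 + st.2.1)) := by
  have HI : ∀ (st : Int × Int × String) (ms : List (Int × Int)) (nxt : PySem.Set (Int × Int × String)),
      t ∈ ms.foldl (fun nxt m =>
        if 0 ≤ m.1 + st.1 ∧ m.1 + st.1 ≤ 4 ∧ 0 ≤ m.2 + st.2.1 ∧ m.2 + st.2.1 ≤ 4 then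
          PySem.Set.add nxt (m.1 + st.1, m.2 + st.2.1, st.2.2 ++ pvCell g (m.1 + st.1) (m.2 + st.2.1))
        else nxt) nxt ↔
      t ∈ nxt ∨ ∃ m ∈ ms,
        (0 ≤ m.1 + st.1 ∧ m.1 + st.1 ≤ 4 ∧ 0 ≤ m.2 + st.2.1 ∧ m.2 + st.2.1 ≤ 4) ∧
        t = (m.1 + st.1, m.2 + st.2.1, st.2.2 ++ pvCell g (m.1 + st.1) (m.2 + st.2.1)) := by
    intro st ms
    induction ms with
    | nil => simp
    | cons m ms ihm =>
      intro nxt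
      simp only [List.foldl_cons]
      by_cases hc : 0 ≤ m.1 + st.1 ∧ m.1 + st.1 ≤ 4 ∧ 0 ≤ m.2 + st.2.1 ∧ m.2 + st.2.1 ≤ 4
      · simp only [if_pos hc, ihm, PySem.Set.mem_add, List.mem_cons]
        constructor
        · rintro ((h | rfl) | ⟨m', hm', h2⟩)
          · exact Or.inl h
          · exact Or.inr ⟨m, Or.inl rfl, hc, rfl⟩
          · exact Or.inr ⟨m', Or.inr hm', h2⟩
        · rintro (h | ⟨m', (rfl | hm'), h1, h2⟩)
          · exact Or.inl (Or.inl h)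
          · exact Or.inl (Or.inr h2)
          · exact Or.inr ⟨m', hm', h1, h2⟩
      · simp only [if_neg hc, ihm, List.mem_cons]
        constructor
        · rintro (h | ⟨m', hm', h2⟩)
          · exact Or.inl h
          · exact Or.inr ⟨m', Or.inr hm', h2⟩
        · rintro (h | ⟨m', (rfl | hm'), h1, h2⟩)
          · exact Or.inl h
          · exact absurd h1 hc
          · exact Or.inr ⟨m', hm', h1, h2⟩
  show t ∈ List.foldl _ PySem.Set.empty F ↔ _
  have HO : ∀ (Fl : List (Int × Int × String)) (nxt : PySem.Set (Int × Int × String)),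
      t ∈ Fl.foldl (fun nxt st =>
        pvMovesB.foldl (fun nxt m =>
          if 0 ≤ m.1 + st.1 ∧ m.1 + st.1 ≤ 4 ∧ 0 ≤ m.2 + st.2.1 ∧ m.2 + st.2.1 ≤ 4 then
            PySem.Set.add nxt (m.1 + st.1, m.2 + st.2.1, st.2.2 ++ pvCell g (m.1 + st.1) (m.2 + st.2.1))
          else nxt) nxt) nxt ↔
      t ∈ nxt ∨ ∃ st ∈ Fl, ∃ m ∈ pvMovesB,
        (0 ≤ m.1 + st.1 ∧ m.1 + st.1 ≤ 4 ∧ 0 ≤ m.2 + st.2.1 ∧ m.2 + st.2.1 ≤ 4) ∧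
        t = (m.1 + st.1, m.2 + st.2.1, st.2.2 ++ pvCell g (m.1 + st.1) (m.2 + st.2.1)) := by
    intro Fl
    induction Fl with
    | nil => simp
    | cons st Fl ihf =>
      intro nxt
      simp only [List.foldl_cons, ihf, HI, List.mem_cons]
      constructor
      · rintro ((h | h2) | ⟨st', hst', h2⟩)
        · exact Or.inl h
        · exact Or.inr ⟨st, Or.inl rfl, h2⟩
        · exact Or.inr ⟨st', Or.inr hst', h2⟩
      · rintro (h | ⟨st', (rfl | hst'), h2⟩)
        · exact Or.inl (Or.inl h)
        · exact Or.inl (Or.inr h2)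
        · exact Or.inr ⟨st', hst', h2⟩
  rw [HO]
  simp [PySem.Set.empty]

-- the frontier invariant: states after k expansions
def pvGood (g : List (List String)) (k : Nat) (t : Int × Int × String) : Prop :=
  ∃ r ∈ PySem.List.pyRange 0 5 1, ∃ c ∈ PySem.List.pyRange 0 5 1,
    ∃ e ∈ pvSufs g r c k, t = (e.1, e.2.1, pvJ (pvCell g r c :: e.2.2))

theorem pvJ_single (s : String) : pvJ [s] = s := by
  apply String.toList_injective
  simp [pvJ, PySem.Str.toList_join, PySem.Chars.join, List.intercalate]

theorem mem_pvSeed (g : List (List String)) (t : Int × Int × String) :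
    t ∈ pvSeed g ↔ pvGood g 0 t := by
  simp only [pvSeed, PySem.Set.mem_ofList, List.mem_flatMap, List.mem_map, pvGood, pvSufs,
    List.mem_singleton]
  constructor
  · rintro ⟨r, hr, c, hc, rfl⟩
    exact ⟨r, hr, c, hc, (r, c, []), rfl, by rw [pvJ_single]⟩
  · rintro ⟨r, hr, c, hc, e, rfl, rfl⟩
    exact ⟨r, hr, c, hc, by rw [pvJ_single]⟩

theorem pvStep_inv (g : List (List String)) (k : Nat) (F : PySem.Set (Int × Int × String))
    (h : ∀ t, t ∈ F ↔ pvGood g k t) :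
    ∀ t, t ∈ pvStep g F ↔ pvGood g (k + 1) t := by
  intro t
  rw [mem_pvStep]
  constructor
  · rintro ⟨st, hst, m, hm, hb, rfl⟩
    obtain ⟨r, hr, c, hc, e, he, rfl⟩ := (h st).mp hst
    dsimp only at hb ⊢
    refine ⟨r, hr, c, hc,
      (m.1 + e.1, m.2 + e.2.1, e.2.2 ++ [pvCell g (m.1 + e.1) (m.2 + e.2.1)]),
      (mem_pvSufs_succ g k r c _).mpr ⟨e, he, m,
        (by simpa [pvMovesA, pvMovesB] using hm), (by omega), rfl⟩, ?_⟩
    dsimp only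
    rw [show pvCell g r c :: (e.2.2 ++ [pvCell g (m.1 + e.1) (m.2 + e.2.1)])
          = (pvCell g r c :: e.2.2) ++ [pvCell g (m.1 + e.1) (m.2 + e.2.1)] from rfl,
      pvJ_append_singleton]
  · rintro ⟨r, hr, c, hc, e, he, rfl⟩
    obtain ⟨e', he', m, hm, hb, rfl⟩ := (mem_pvSufs_succ g k r c e).mp he
    refine ⟨(e'.1, e'.2.1, pvJ (pvCell g r c :: e'.2.2)),
      (h _).mpr ⟨r, hr, c, hc, e', he', rfl⟩,
      m, (by simpa [pvMovesA, pvMovesB] using hm), (by dsimp only; omega), ?_⟩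
    dsimp only
    rw [show pvCell g r c :: (e'.2.2 ++ [pvCell g (m.1 + e'.1) (m.2 + e'.2.1)])
          = (pvCell g r c :: e'.2.2) ++ [pvCell g (m.1 + e'.1) (m.2 + e'.2.1)] from rfl,
      pvJ_append_singleton]

-- Nodup preservation
theorem foldl_nodup {α β : Type} (f : List β → α → List β)
    (h : ∀ acc a, acc.Nodup → (f acc a).Nodup) :
    ∀ (l : List α) (acc : List β), acc.Nodup → (l.foldl f acc).Nodup := by
  intro l
  induction l with
  | nil => intro acc ha; simpa using ha
  | cons a l ih => intro acc ha; exact ih _ (h acc a ha)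

theorem nodup_pvDfs (g : List (List String)) :
    ∀ (f : Nat) (x y : Int) (nums : List String) (acc : PySem.Set String),
      acc.Nodup → (pvDfs g x y nums f acc).Nodup := by
  intro f
  induction f with
  | zero => intro x y nums acc ha; simp only [pvDfs]; exact PySem.Set.nodup_add _ _ ha
  | succ f ih =>
    intro x y nums acc ha
    simp only [pvDfs]
    refine foldl_nodup _ ?_ _ _ ha
    intro acc m hn
    by_cases hc : m.1 + x < 0 ∨ m.1 + x > 4 ∨ m.2 + y < 0 ∨ m.2 + y > 4
    · simpa [if_pos hc] using hn
    · simpa [if_neg hc] using ih _ _ _ _ hn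

-- ===== VERDICT (by name: the statement is the Claim_ definition above) =====
theorem compute_six_digit_numbers_spec : Claim_equal_compute_six_digit_numbers := by
  intro graph _ _
  unfold Spec_compute_six_digit_numbers
  unfold compute_six_digit_numbers compute_six_digit_numbers_alt
  -- the frontier after the 5 expansions
  have hinv : ∀ t, t ∈ (PySem.List.pyRange 0 5 1).foldl (fun F _ => pvStep graph F) (pvSeed graph)
      ↔ pvGood graph 5 t := by
    have h5 : PySem.List.pyRange 0 5 1 = [0, 1, 2, 3, 4] := by
      simp [PySem.List.pyRange_one]; rfl
    rw [h5]
    simp only [List.foldl_cons, List.foldl_nil]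
    exact pvStep_inv graph 4 _ (pvStep_inv graph 3 _ (pvStep_inv graph 2 _
      (pvStep_inv graph 1 _ (pvStep_inv graph 0 _ (mem_pvSeed graph)))))
  have hmem : ∀ s : String,
      s ∈ (PySem.List.pyRange 0 5 1).foldl (fun acc row =>
            (PySem.List.pyRange 0 5 1).foldl (fun acc col =>
              pvDfs graph row col [pvCell graph row col] 5 acc) acc) (PySem.Set.empty)
      ↔ s ∈ PySem.Set.ofList
          ((((PySem.List.pyRange 0 5 1).foldl (fun F _ => pvStep graph F) (pvSeed graph))).map
            (fun st => st.2.2)) := by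
    intro s
    rw [mem_pvDfs_grid, PySem.Set.mem_ofList, List.mem_map]
    constructor
    · rintro (h | ⟨r, hr, c, hc, e, he, rfl⟩)
      · simp [PySem.Set.empty] at h
      · exact ⟨(e.1, e.2.1, pvJ (pvCell graph r c :: e.2.2)),
          (hinv _).mpr ⟨r, hr, c, hc, e, he, rfl⟩, rfl⟩
    · rintro ⟨t, ht, rfl⟩
      obtain ⟨r, hr, c, hc, e, he, rfl⟩ := (hinv t).mp ht
      exact Or.inr ⟨r, hr, c, hc, e, he, rfl⟩
  have hnodA : ((PySem.List.pyRange 0 5 1).foldl (fun acc row =>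
      (PySem.List.pyRange 0 5 1).foldl (fun acc col =>
        pvDfs graph row col [pvCell graph row col] 5 acc) acc)
      (PySem.Set.empty : PySem.Set String)).Nodup := by
    refine foldl_nodup _ ?_ _ _ (by simp [PySem.Set.empty])
    intro acc r hn
    refine foldl_nodup _ ?_ _ _ hn
    intro acc c hn'
    exact nodup_pvDfs graph 5 r c _ acc hn'
  have hperm := (List.perm_ext_iff_of_nodup hnodA (PySem.Set.nodup_ofList _)).mpr hmem
  simp only [PySem.Set.len]
  exact congrArg (fun n : Nat => (n : Int)) hperm.length_eq
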